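-- pv_equiv track=rewrite | github.com/fabienmoreno/adventofcode2022 | 08/part2.py | check_higher
-- ===== SOURCE A (Python) =====
-- def check_higher(forest,x,y):
--     h=forest[x][y] #Get reference height
--     hx=len(forest)
--     hy=len(forest[x])
--     (a,b,c,d)=(0,0,0,0)
--     (s,t,u,v)=(0,0,0,0)
--     for i in range(x-1,-1,-1):#check haut
--         if forest[i][y]>=s:
--             a=x-i
--             s=forest[i][y]
--     for i in range(x+1,hx): #Check bas
--         if forest[i][y]>=t:
--             b=i-x
--             t=forest[i][y]
--     for j in range(y-1,-1,-1): #Check gauche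
--         if forest[x][j]>=u:
--             c=y-j
--             u=forest[x][j]
--     for j in range(y+1,hy): #Check droite
--         if forest[x][j]>=v:
--             d=j-y
--             v=forest[x][j]
--     return (a,b,c,d),(s,t,u,v)
-- ===== SOURCE B (Python) =====
-- def ray_reach(ray):
--     mx = max([0] + ray)
--     dist = 0
--     for j, v in enumerate(ray):
--         if v == mx:
--             dist = j + 1
--     return dist, mx
--
-- def check_higher(forest, x, y):
--     up = [forest[i][y] for i in range(x - 1, -1, -1)]
--     down = [forest[i][y] for i in range(x + 1, len(forest))]
--     left = [forest[x][j] for j in range(y - 1, -1, -1)]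
--     right = [forest[x][j] for j in range(y + 1, len(forest[x]))]
--     (a, s) = ray_reach(up)
--     (b, t) = ray_reach(down)
--     (c, u) = ray_reach(left)
--     (d, v) = ray_reach(right)
--     return (a, b, c, d), (s, t, u, v)
-- ===== Notes on version B (the rewrite author's own statement) =====
-- stated objective: alternative
-- what changed: A runs one fused loop per direction that simultaneously tracks the running max and its distance; B first materialises the four outward rays as lists, then per ray computes the max (against ground level 0) in one pass and locates the furthest occurrence of that max in a second pass.
import Mathlib
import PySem

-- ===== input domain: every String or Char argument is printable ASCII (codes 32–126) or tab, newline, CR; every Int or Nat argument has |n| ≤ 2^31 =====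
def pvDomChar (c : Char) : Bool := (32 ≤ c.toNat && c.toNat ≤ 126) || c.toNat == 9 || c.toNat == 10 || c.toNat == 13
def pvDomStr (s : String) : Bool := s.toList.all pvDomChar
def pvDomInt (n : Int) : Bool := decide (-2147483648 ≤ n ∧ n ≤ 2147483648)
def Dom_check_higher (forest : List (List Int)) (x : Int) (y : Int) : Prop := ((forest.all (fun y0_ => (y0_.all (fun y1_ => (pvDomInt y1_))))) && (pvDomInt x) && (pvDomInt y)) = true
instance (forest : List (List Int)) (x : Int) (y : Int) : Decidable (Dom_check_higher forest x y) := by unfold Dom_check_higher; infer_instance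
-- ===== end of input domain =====

-- B replaces A's fused running-max/distance loop per direction by building the four
-- outward rays and, per ray, taking the max (over the ray plus ground level 0) and then
-- locating the furthest occurrence of that max — a max-then-locate two-pass decomposition.

-- shared cell access forest[i][j] (total form; under Pre_ every access is in range)
def pvCell (forest : List (List Int)) (i : Int) (j : Int) : Int :=
  PySem.List.pyGetD (PySem.List.pyGetD forest i []) j 0

-- ===== PORT A =====
def check_higher (forest : List (List Int)) (x : Int) (y : Int) :
    (Int × Int × Int × Int) × (Int × Int × Int × Int) :=
  let _h := pvCell forest x y           -- h = forest[x][y] (unused afterwards in A)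
  let hx : Int := forest.length
  let hy : Int := ((PySem.List.pyGetD forest x []).length : Int)
  -- check haut
  let p1 := (PySem.List.pyRange (x - 1) (-1) (-1)).foldl
    (fun (p : Int × Int) i => if pvCell forest i y ≥ p.2 then (x - i, pvCell forest i y) else p) (0, 0)
  -- check bas
  let p2 := (PySem.List.pyRange (x + 1) hx 1).foldl
    (fun (p : Int × Int) i => if pvCell forest i y ≥ p.2 then (i - x, pvCell forest i y) else p) (0, 0)
  -- check gauche
  let p3 := (PySem.List.pyRange (y - 1) (-1) (-1)).foldl
    (fun (p : Int × Int) j => if pvCell forest x j ≥ p.2 then (y - j, pvCell forest x j) else p) (0, 0)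
  -- check droite
  let p4 := (PySem.List.pyRange (y + 1) hy 1).foldl
    (fun (p : Int × Int) j => if pvCell forest x j ≥ p.2 then (j - y, pvCell forest x j) else p) (0, 0)
  ((p1.1, p2.1, p3.1, p4.1), (p1.2, p2.2, p3.2, p4.2))

-- ===== PORT B =====
-- ray_reach(ray): mx = max([0] + ray); dist = furthest j with ray[j] == mx, plus 1 (else 0)
def pvRayReach (ray : List Int) : Int × Int :=
  let mx : Int :=
    match PySem.List.max? ((0 : Int) :: ray) (fun v => v) with
    | some m => m
    | none => 0            -- unreachable: the list is nonempty
  let dist : Int := (PySem.List.enumerate ray).foldl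
    (fun d jv => if jv.2 = mx then jv.1 + 1 else d) 0
  (dist, mx)

def check_higher_alt (forest : List (List Int)) (x : Int) (y : Int) :
    (Int × Int × Int × Int) × (Int × Int × Int × Int) :=
  let up    := (PySem.List.pyRange (x - 1) (-1) (-1)).map (fun i => pvCell forest i y)
  let down  := (PySem.List.pyRange (x + 1) (forest.length : Int) 1).map (fun i => pvCell forest i y)
  let left  := (PySem.List.pyRange (y - 1) (-1) (-1)).map (fun j => pvCell forest x j)
  let right := (PySem.List.pyRange (y + 1) ((PySem.List.pyGetD forest x []).length : Int) 1).map
    (fun j => pvCell forest x j)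
  let as := pvRayReach up
  let bt := pvRayReach down
  let cu := pvRayReach left
  let dv := pvRayReach right
  ((as.1, bt.1, cu.1, dv.1), (as.2, bt.2, cu.2, dv.2))

-- ===== PRECONDITION & SPEC =====
-- Exactly the inputs on which the Python A returns (no IndexError): x is a valid
-- (possibly negative, Python-wrapping) row index, and y is a valid (possibly negative)
-- column index in every row — A's four loops visit every row at column y.
def Pre_check_higher (forest : List (List Int)) (x : Int) (y : Int) : Prop :=
  PySem.Raise.InRange forest.length x ∧ ∀ row ∈ forest, PySem.Raise.InRange row.length y
instance (forest : List (List Int)) (x : Int) (y : Int) : Decidable (Pre_check_higher forest x y) := by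
  unfold Pre_check_higher; infer_instance

def pvWitness_check_higher : List (List Int) × Int × Int := ([[1, 2], [3, 4]], 0, 1)

def Spec_check_higher (forest : List (List Int)) (x : Int) (y : Int)
    (out : (Int × Int × Int × Int) × (Int × Int × Int × Int)) : Prop :=
  out = check_higher_alt forest x y
instance (forest : List (List Int)) (x : Int) (y : Int)
    (out : (Int × Int × Int × Int) × (Int × Int × Int × Int)) : Decidable (Spec_check_higher forest x y out) := by
  unfold Spec_check_higher; infer_instance

-- ===== CLAIM (what is proved, stated in full; the proofs are below) =====
def Claim_equal_check_higher : Prop := ∀ (forest : List (List Int)) (x : Int) (y : Int), Dom_check_higher forest x y → Pre_check_higher forest x y → Spec_check_higher forest x y (check_higher forest x y)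

-- ===== LEMMAS AND PROOFS =====

-- A's fused loop, abstracted over the ray of visited values, with j the distance offset.
def pvFused : List Int → Int → (Int × Int) → Int × Int
  | [], _, p => p
  | v :: rest, j, p => pvFused rest (j + 1) (if v ≥ p.2 then (j + 1, v) else p)

-- B's locate pass, abstracted: furthest (offset) position of mx, default d.
def pvDistFold : List Int → Int → Int → Int → Int
  | [], _, _, d => d
  | v :: rest, mx, j, d => pvDistFold rest mx (j + 1) (if v = mx then j + 1 else d)

theorem pvDistFold_irrel (mx : Int) :
    ∀ (l : List Int), mx ∈ l → ∀ (j d d' : Int), pvDistFold l mx j d = pvDistFold l mx j d' := by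
  intro l
  induction l with
  | nil => intro h; cases h
  | cons v t ih =>
    intro hmem j d d'
    by_cases hv : v = mx
    · simp [pvDistFold, hv]
    · have ht : mx ∈ t := by
        cases hmem with
        | head => exact absurd rfl hv
        | tail _ h => exact h
      simp only [pvDistFold, if_neg hv]
      exact ih ht (j + 1) d d'

theorem pvFused_spec :
    ∀ (ray : List Int) (j d m : Int),
      pvFused ray j (d, m) = (pvDistFold ray (ray.foldl max m) j d, ray.foldl max m) := by
  intro ray
  induction ray with
  | nil => intro j d m; simp [pvFused, pvDistFold]
  | cons v t ih =>
    intro j d m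
    by_cases hv : v ≥ m
    · have hmax : max m v = v := max_eq_right hv
      simp only [pvFused, pvDistFold, List.foldl_cons, if_pos hv, hmax]
      rw [ih (j + 1) (j + 1) v]
      by_cases hvM : v = t.foldl max v
      · rw [if_pos hvM]
      · rw [if_neg hvM]
        have hmem : t.foldl max v ∈ t := by
          rcases PySem.List.foldl_max_mem t v with h | h
          · exact absurd h.symm hvM
          · exact h
        exact congrArg (fun z => (z, t.foldl max v)) (pvDistFold_irrel _ t hmem (j + 1) (j + 1) d)
    · have hlt : v < m := lt_of_not_ge hv
      have hmax : max m v = m := max_eq_left (le_of_lt hlt)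
      simp only [pvFused, pvDistFold, List.foldl_cons, if_neg hv, hmax]
      rw [ih (j + 1) d m]
      have hm_le : m ≤ t.foldl max m := (PySem.List.le_foldl_max t m).1
      have : ¬ v = t.foldl max m := by intro h; omega
      rw [if_neg this]

-- A's foldl over an index list equals pvFused over the mapped ray, when the index list
-- enumerates distances j+1, j+2, … (hypothesis on the k-th element).
theorem pvFoldl_eq_fused (f dist : Int → Int) :
    ∀ (idxs : List Int) (j : Int) (p : Int × Int),
      (∀ (n : Nat) (hn : n < idxs.length), dist idxs[n] = j + n + 1) →
      idxs.foldl (fun p i => if f i ≥ p.2 then (dist i, f i) else p) p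
        = pvFused (idxs.map f) j p := by
  intro idxs
  induction idxs with
  | nil => intro j p _; simp [pvFused]
  | cons i t ih =>
    intro j p h
    have h0 : dist i = j + 1 := by
      have := h 0 (by simp)
      simpa using this
    simp only [List.foldl_cons, List.map_cons, pvFused, h0]
    rw [ih (j + 1)]
    intro n hn
    have := h (n + 1) (by simpa using Nat.succ_lt_succ hn)
    simp only [List.getElem_cons_succ] at this
    rw [this]; push_cast; ring

-- B's enumerate-foldl locate pass is pvDistFold.
theorem pvEnumFold_eq_distFold (mx : Int) :
    ∀ (ray : List Int) (s d : Int),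
      (PySem.List.enumerate ray s).foldl (fun d jv => if jv.2 = mx then jv.1 + 1 else d) d
        = pvDistFold ray mx s d := by
  intro ray
  induction ray with
  | nil => intro s d; simp [PySem.List.enumerate_nil, pvDistFold]
  | cons v t ih =>
    intro s d
    rw [PySem.List.enumerate_cons]
    simp only [List.foldl_cons, pvDistFold]
    exact ih (s + 1) _

-- per-ray: A's fused result equals B's ray_reach.
theorem pvFused_eq_rayReach (ray : List Int) :
    pvFused ray 0 (0, 0) = pvRayReach ray := by
  rw [pvFused_spec ray 0 0 0]
  unfold pvRayReach
  rw [PySem.List.max?_id_cons]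
  simp only
  rw [pvEnumFold_eq_distFold]

-- index facts for the four ranges
theorem pvRange_down_get (a b : Int) (n : Nat) (hn : n < (PySem.List.pyRange a b (-1)).length) :
    (PySem.List.pyRange a b (-1))[n] = a - n := by
  simp [PySem.List.pyRange_neg_one] at hn ⊢
theorem pvRange_up_get (a b : Int) (n : Nat) (hn : n < (PySem.List.pyRange a b 1).length) :
    (PySem.List.pyRange a b 1)[n] = a + n := by
  simp [PySem.List.pyRange_one] at hn ⊢

-- ===== VERDICT (by name: the statement is the Claim_ definition above) =====
theorem check_higher_spec : Claim_equal_check_higher := by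
  intro forest x y _ _
  unfold Spec_check_higher check_higher check_higher_alt
  simp only
  rw [pvFoldl_eq_fused (fun i => pvCell forest i y) (fun i => x - i)
        (PySem.List.pyRange (x - 1) (-1) (-1)) 0 (0, 0)
        (by intro n hn; rw [pvRange_down_get _ _ n hn]; ring),
      pvFoldl_eq_fused (fun i => pvCell forest i y) (fun i => i - x)
        (PySem.List.pyRange (x + 1) (forest.length : Int) 1) 0 (0, 0)
        (by intro n hn; rw [pvRange_up_get _ _ n hn]; ring),
      pvFoldl_eq_fused (fun j => pvCell forest x j) (fun j => y - j)
        (PySem.List.pyRange (y - 1) (-1) (-1)) 0 (0, 0)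
        (by intro n hn; rw [pvRange_down_get _ _ n hn]; ring),
      pvFoldl_eq_fused (fun j => pvCell forest x j) (fun j => j - y)
        (PySem.List.pyRange (y + 1) ((PySem.List.pyGetD forest x []).length : Int) 1) 0 (0, 0)
        (by intro n hn; rw [pvRange_up_get _ _ n hn]; ring),
      pvFused_eq_rayReach, pvFused_eq_rayReach, pvFused_eq_rayReach, pvFused_eq_rayReach]
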